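-- pv_equiv track=rewrite | github.com/cbizon/metapath-counts | src/metapath_counts/aggregation.py | parse_metapath
-- ===== SOURCE A (Python) =====
-- from typing import Iterator, List, Tuple
--
-- def parse_metapath(metapath: str) -> Tuple[List[str], List[str], List[str]]:
--     """
--     Parse a metapath into node types, predicates, and directions.
--
--     Metapath format: Type1|pred1|dir1|Type2|pred2|dir2|...|TypeN
--     - N-hop path has N+1 node types, N predicates, N directions
--     - Number of parts = 1 + 3*N (for N hops)
--
--     Examples:
--         1-hop: "A|pred1|F|B" -> nodes=['A', 'B'], predicates=['pred1'], directions=['F']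
--         2-hop: "A|p1|F|B|p2|R|C" -> nodes=['A', 'B', 'C'], predicates=['p1', 'p2'], directions=['F', 'R']
--         3-hop: "A|p1|F|B|p2|R|C|p3|F|D" -> nodes=['A', 'B', 'C', 'D'], ...
--
--     Args:
--         metapath: Pipe-separated metapath string
--
--     Returns:
--         Tuple of (nodes, predicates, directions)
--
--     Raises:
--         ValueError: If metapath format is invalid
--     """
--     parts = metapath.split('|')
--     num_parts = len(parts)
--
--     # Formula: num_parts = 1 + 3*n_hops
--     # So: n_hops = (num_parts - 1) / 3
--     if (num_parts - 1) % 3 != 0 or num_parts < 4: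
--         raise ValueError(f"Invalid metapath format: {metapath} (parts: {num_parts}, expected 1+3*N)")
--
--     n_hops = (num_parts - 1) // 3
--
--     # Extract nodes: positions 0, 3, 6, 9, ... (every 3rd starting at 0)
--     nodes = [parts[i * 3] for i in range(n_hops + 1)]
--
--     # Extract predicates: positions 1, 4, 7, 10, ... (every 3rd starting at 1)
--     predicates = [parts[i * 3 + 1] for i in range(n_hops)]
--
--     # Extract directions: positions 2, 5, 8, 11, ... (every 3rd starting at 2)
--     directions = [parts[i * 3 + 2] for i in range(n_hops)]
--
--     return nodes, predicates, directions
-- ===== SOURCE B (Python) =====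
-- def parse_metapath(metapath):
--     parts = metapath.split('|')
--     num_parts = len(parts)
--     if (num_parts - 1) % 3 != 0 or num_parts < 4:
--         raise ValueError(f"Invalid metapath format: {metapath} (parts: {num_parts}, expected 1+3*N)")
--
--     def chunk(ps):
--         # ps always has length 3*k + 1 here
--         if len(ps) == 1:
--             return [ps[0]], [], []
--         nodes, predicates, directions = chunk(ps[3:])
--         return [ps[0]] + nodes, [ps[1]] + predicates, [ps[2]] + directions
--
--     return chunk(parts)
-- ===== Notes on version B (the rewrite author's own statement) =====
-- stated objective: alternative
-- what changed: Replaces the three strided index comprehensions over range() with a single structural recursion that peels the parts list in (node, predicate, direction) chunks of three, building all three lists in one pass without index arithmetic.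
import Mathlib
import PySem

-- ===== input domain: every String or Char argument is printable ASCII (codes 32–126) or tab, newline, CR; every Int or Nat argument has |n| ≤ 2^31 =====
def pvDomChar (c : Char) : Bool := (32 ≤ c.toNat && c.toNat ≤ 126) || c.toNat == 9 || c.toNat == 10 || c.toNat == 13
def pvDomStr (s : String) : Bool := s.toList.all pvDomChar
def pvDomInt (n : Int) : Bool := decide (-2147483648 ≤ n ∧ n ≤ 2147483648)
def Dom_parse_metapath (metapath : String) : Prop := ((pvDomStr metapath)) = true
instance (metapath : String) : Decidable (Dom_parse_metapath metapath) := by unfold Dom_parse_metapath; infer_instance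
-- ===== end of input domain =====

-- B replaces A's three strided index comprehensions with a single chunk-of-three structural recursion (same split and validation).

-- ===== PORT A =====
-- A: split on '|', validate the 1+3*N shape, then three strided comprehensions over range().
-- split? with the nonempty separator "|" is always some, and always yields at least one part,
-- so the .getD [] never fires and Nat subtraction in (num_parts - 1) is exact under Pre_.
def parse_metapath (metapath : String) : List String × List String × List String :=
  let parts := (PySem.Str.split? metapath "|").getD []
  let num_parts := parts.length
  if (num_parts - 1) % 3 ≠ 0 ∨ num_parts < 4 then
    ([], [], [])  -- Python raises ValueError here; excluded by Pre_parse_metapath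
  else
    let n_hops := (num_parts - 1) / 3
    let nodes := (List.range (n_hops + 1)).map (fun i => ((PySem.List.pyGet? parts ((i * 3 : Nat) : Int)).getD ""))
    let predicates := (List.range n_hops).map (fun i => ((PySem.List.pyGet? parts ((i * 3 + 1 : Nat) : Int)).getD ""))
    let directions := (List.range n_hops).map (fun i => ((PySem.List.pyGet? parts ((i * 3 + 2 : Nat) : Int)).getD ""))
    (nodes, predicates, directions)

-- ===== PORT B =====
-- B's chunk helper: peel one (node, predicate, direction) triple off the front per step.
def pvChunk : List String → List String × List String × List String
  | t :: p :: d :: rest =>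
    let r := pvChunk rest
    (t :: r.1, p :: r.2.1, d :: r.2.2)
  | rest => (rest, [], [])

def parse_metapath_alt (metapath : String) : List String × List String × List String :=
  let parts := (PySem.Str.split? metapath "|").getD []
  let num_parts := parts.length
  if (num_parts - 1) % 3 ≠ 0 ∨ num_parts < 4 then
    ([], [], [])  -- Python raises the identical ValueError here; excluded by Pre_parse_metapath
  else
    pvChunk parts

-- ===== PRECONDITION & SPEC =====
-- Exactly the inputs on which A returns: the pipe-split has length 1+3*N with N ≥ 1; elsewhere A (and B) raise ValueError.
def Pre_parse_metapath (metapath : String) : Prop :=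
  (((PySem.Str.split? metapath "|").getD []).length - 1) % 3 = 0 ∧
  4 ≤ ((PySem.Str.split? metapath "|").getD []).length
instance (metapath : String) : Decidable (Pre_parse_metapath metapath) := by unfold Pre_parse_metapath; infer_instance
def pvWitness_parse_metapath : String := "A|p1|F|B"

def Spec_parse_metapath (metapath : String) (out : List String × List String × List String) : Prop := out = parse_metapath_alt metapath
instance (metapath : String) (out : List String × List String × List String) : Decidable (Spec_parse_metapath metapath out) := by unfold Spec_parse_metapath; infer_instance

-- ===== CLAIM (what is proved, stated in full; the proofs are below) =====
def Claim_equal_parse_metapath : Prop := ∀ (metapath : String), Dom_parse_metapath metapath → Pre_parse_metapath metapath → Spec_parse_metapath metapath (parse_metapath metapath)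

-- ===== LEMMAS AND PROOFS =====

lemma pvIdx3 {α : Type} (a b c : α) (l : List α) (i : Nat) : (a :: b :: c :: l)[i + 3]? = l[i]? := rfl

lemma pvChunk_eq (k : Nat) : ∀ (parts : List String), parts.length = 3 * k + 1 →
    pvChunk parts =
      ((List.range (k + 1)).map (fun i => (parts[i * 3]?).getD ""),
       (List.range k).map (fun i => (parts[i * 3 + 1]?).getD ""),
       (List.range k).map (fun i => (parts[i * 3 + 2]?).getD "")) := by
  induction k with
  | zero =>
    intro parts h
    match parts, h with
    | [t], _ => simp [pvChunk]
  | succ k ih =>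
    intro parts h
    match parts with
    | t :: p :: d :: rest =>
      have hr : rest.length = 3 * k + 1 := by simp at h; omega
      simp only [pvChunk, ih rest hr, Prod.mk.injEq]
      refine ⟨?_, ?_, ?_⟩
      · conv_rhs => rw [List.range_succ_eq_map]
        simp only [List.map_cons, List.map_map]
        refine congrArg₂ _ rfl (List.map_congr_left ?_)
        intro i _
        simp only [Function.comp_apply]
        rw [show (i + 1) * 3 = i * 3 + 3 from by ring, pvIdx3]
      · conv_rhs => rw [List.range_succ_eq_map]
        simp only [List.map_cons, List.map_map]
        refine congrArg₂ _ rfl (List.map_congr_left ?_)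
        intro i _
        simp only [Function.comp_apply]
        rw [show (i + 1) * 3 + 1 = i * 3 + 1 + 3 from by ring, pvIdx3]
      · conv_rhs => rw [List.range_succ_eq_map]
        simp only [List.map_cons, List.map_map]
        refine congrArg₂ _ rfl (List.map_congr_left ?_)
        intro i _
        simp only [Function.comp_apply]
        rw [show (i + 1) * 3 + 2 = i * 3 + 2 + 3 from by ring, pvIdx3]

-- ===== VERDICT (by name: the statement is the Claim_ definition above) =====
theorem parse_metapath_spec : Claim_equal_parse_metapath := by
  intro metapath _ hpre
  unfold Spec_parse_metapath parse_metapath parse_metapath_alt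
  obtain ⟨h3, h4⟩ := hpre
  set parts := (PySem.Str.split? metapath "|").getD [] with hp
  simp only []
  have hguard : ¬ ((parts.length - 1) % 3 ≠ 0 ∨ parts.length < 4) := by
    omega
  rw [if_neg hguard, if_neg hguard]
  obtain ⟨k, hk⟩ : ∃ k, parts.length = 3 * k + 1 := ⟨(parts.length - 1) / 3, by omega⟩
  have hhops : (parts.length - 1) / 3 = k := by omega
  rw [pvChunk_eq k parts hk, hhops]
  refine Prod.ext ?_ (Prod.ext ?_ ?_) <;>
  · apply List.map_congr_left
    intro i _
    rw [PySem.List.pyGet?_natCast]
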